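-- pv_equiv track=rewrite | github.com/jmflynn81/advent-of-code-2020 | 04/passport_check.py | get_formatted_passports
-- ===== SOURCE A (Python) =====
-- def get_formatted_passports(passports):
--     formatted_passports = [{}]
--     counter = 0
--     for line in passports:
--         if not line == "":
--             cats = line.split()
--             for cat in cats:
--                 category, value = cat.split(':')
--                 if category != 'cid':
--                     formatted_passports[counter][category] = value
--         else:
--             counter += 1
--             formatted_passports.append({})
--     return formatted_passports
-- ===== SOURCE B (Python) =====
-- def get_formatted_passports(passports):
--     # Phase 1: split the lines into blank-separated groups (including empty ones).
--     groups = []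
--     current = []
--     for line in passports:
--         if line == "":
--             groups.append(current)
--             current = []
--         else:
--             current.append(line)
--     groups.append(current)
--     # Phase 2: turn each group into a dict, dropping 'cid'.
--     result = []
--     for group in groups:
--         pairs = []
--         for line in group:
--             for tok in line.split():
--                 key, value = tok.split(':')
--                 pairs.append((key, value))
--         result.append({k: v for k, v in pairs if k != 'cid'})
--     return result
-- ===== Notes on version B (the rewrite author's own statement) =====
-- stated objective: alternative
-- what changed: Replaces A's counter-indexed in-place dict mutation with a two-phase pipeline: first split the lines into blank-separated groups, then map each group to a dict via a flat token-pair list and a comprehension.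
import Mathlib
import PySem

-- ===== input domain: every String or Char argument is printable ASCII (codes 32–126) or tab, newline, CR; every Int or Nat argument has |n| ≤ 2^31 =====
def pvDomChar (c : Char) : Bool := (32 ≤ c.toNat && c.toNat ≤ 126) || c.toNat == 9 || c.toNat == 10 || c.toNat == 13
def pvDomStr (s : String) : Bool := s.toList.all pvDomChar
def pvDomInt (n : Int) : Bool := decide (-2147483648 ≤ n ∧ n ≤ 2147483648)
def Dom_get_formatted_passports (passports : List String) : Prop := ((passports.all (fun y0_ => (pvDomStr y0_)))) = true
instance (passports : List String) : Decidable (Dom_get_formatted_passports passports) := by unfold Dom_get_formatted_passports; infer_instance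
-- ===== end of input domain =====

-- B replaces A's counter-indexed in-place mutation by a two-phase group-then-map pipeline (alternative decomposition, same cost).

-- ===== PORT A =====
-- inner token loop of A: category, value = cat.split(':'); skip 'cid'; d[category] = value
-- (the `_ => d` arm is the ValueError path, excluded by Pre_)
def pvParseLine (d : PySem.Dict String String) (line : String) : PySem.Dict String String :=
  (PySem.Str.split₀ line).foldl (fun d cat =>
    match (PySem.Str.split? cat ":").getD [] with
    | [category, value] => if category ≠ "cid" then d.insert category value else d
    | _ => d) d

def get_formatted_passports (passports : List String) : List (List (String × String)) :=
  let st := passports.foldl (fun (st : List (PySem.Dict String String) × Nat) line =>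
    if ¬ (line = "") then (st.1.modify st.2 (fun d => pvParseLine d line), st.2)
    else (st.1 ++ [PySem.Dict.empty], st.2 + 1)) ([PySem.Dict.empty], 0)
  st.1.map PySem.Dict.items

-- ===== PORT B =====
-- pairs list of one group: nested loop appending (key, value) per token ('_ => ps' is the ValueError path, excluded by Pre_)
def pvGroupPairs (g : List String) : List (String × String) :=
  g.foldl (fun ps line =>
    (PySem.Str.split₀ line).foldl (fun ps tok =>
      match (PySem.Str.split? tok ":").getD [] with
      | [k, v] => ps ++ [(k, v)]
      | _ => ps) ps) []

-- {k: v for k, v in pairs if k != 'cid'}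
def pvParseGroup (g : List String) : PySem.Dict String String :=
  ((pvGroupPairs g).filter (fun p => p.1 ≠ "cid")).foldl
    (fun d p => d.insert p.1 p.2) PySem.Dict.empty

def get_formatted_passports_alt (passports : List String) : List (List (String × String)) :=
  let st := passports.foldl (fun (st : List (List String) × List String) line =>
    if line = "" then (st.1 ++ [st.2], ([] : List String)) else (st.1, st.2 ++ [line])) ([], [])
  ((st.1 ++ [st.2]).map pvParseGroup).map PySem.Dict.items

-- ===== PRECONDITION & SPEC =====
-- Pre_ excludes exactly the inputs where Python A raises ValueError: some whitespace-separated
-- token of some line does not contain exactly one ':' (both Pythons raise there).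
def Pre_get_formatted_passports (passports : List String) : Prop :=
  ∀ line ∈ passports, ∀ tok ∈ PySem.Str.split₀ line, ((PySem.Str.split? tok ":").getD []).length = 2
instance (passports : List String) : Decidable (Pre_get_formatted_passports passports) := by
  unfold Pre_get_formatted_passports; infer_instance
def pvWitness_get_formatted_passports : List String :=
  ["ecl:gry pid:860033327", "", "byr:1937 cid:147"]
def Spec_get_formatted_passports (passports : List String) (out : List (List (String × String))) : Prop := out = get_formatted_passports_alt passports
instance (passports : List String) (out : List (List (String × String))) : Decidable (Spec_get_formatted_passports passports out) := by unfold Spec_get_formatted_passports; infer_instance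

-- ===== CLAIM (what is proved, stated in full; the proofs are below) =====
def Claim_equal_get_formatted_passports : Prop := ∀ (passports : List String), Dom_get_formatted_passports passports → Pre_get_formatted_passports passports → Spec_get_formatted_passports passports (get_formatted_passports passports)

-- ===== LEMMAS AND PROOFS =====

-- insert the (non-cid) pairs of a pair list into d
def pvInsPairs (d : PySem.Dict String String) (ps : List (String × String)) : PySem.Dict String String :=
  (ps.filter (fun p => p.1 ≠ "cid")).foldl (fun d p => d.insert p.1 p.2) d

-- pairs contributed by one token
def pvTokPairs (tok : String) : List (String × String) :=
  match (PySem.Str.split? tok ":").getD [] with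
  | [k, v] => [(k, v)]
  | _ => []

theorem pvInsPairs_append (d : PySem.Dict String String) (ps qs : List (String × String)) :
    pvInsPairs d (ps ++ qs) = pvInsPairs (pvInsPairs d ps) qs := by
  simp [pvInsPairs, List.filter_append, List.foldl_append]

theorem pvInsPairs_tok (d : PySem.Dict String String) (tok : String) :
    pvInsPairs d (pvTokPairs tok) =
      (match (PySem.Str.split? tok ":").getD [] with
       | [k, v] => if k ≠ "cid" then d.insert k v else d
       | _ => d) := by
  unfold pvTokPairs
  rcases h : (PySem.Str.split? tok ":").getD [] with _ | ⟨k, _ | ⟨v, _ | _⟩⟩ <;>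
    simp [pvInsPairs, List.filter] <;> split_ifs <;> simp_all

theorem pvGroupPairs_inner (toks : List String) (ps : List (String × String)) :
    toks.foldl (fun ps tok =>
      match (PySem.Str.split? tok ":").getD [] with
      | [k, v] => ps ++ [(k, v)]
      | _ => ps) ps = ps ++ toks.flatMap pvTokPairs := by
  induction toks generalizing ps with
  | nil => simp
  | cons t ts ih =>
      simp only [List.foldl_cons, List.flatMap_cons, ih]
      unfold pvTokPairs
      rcases h : (PySem.Str.split? t ":").getD [] with _ | ⟨k, _ | ⟨v, _ | _⟩⟩ <;> simp

theorem pvGroupPairs_eq (g : List String) :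
    pvGroupPairs g = g.flatMap (fun line => (PySem.Str.split₀ line).flatMap pvTokPairs) := by
  unfold pvGroupPairs
  rw [show (fun (ps : List (String × String)) (line : String) =>
        (PySem.Str.split₀ line).foldl (fun ps tok =>
          match (PySem.Str.split? tok ":").getD [] with
          | [k, v] => ps ++ [(k, v)]
          | _ => ps) ps)
      = (fun ps line => ps ++ (PySem.Str.split₀ line).flatMap pvTokPairs) from
    funext fun ps => funext fun line => pvGroupPairs_inner _ _]
  exact PySem.List.foldl_append_eq_flatMap _ _ _

theorem pvInsPairs_line (d : PySem.Dict String String) (toks : List String) :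
    pvInsPairs d (toks.flatMap pvTokPairs) =
      toks.foldl (fun d cat =>
        match (PySem.Str.split? cat ":").getD [] with
        | [category, value] => if category ≠ "cid" then d.insert category value else d
        | _ => d) d := by
  induction toks generalizing d with
  | nil => simp [pvInsPairs]
  | cons t ts ih =>
      simp only [List.flatMap_cons, List.foldl_cons, pvInsPairs_append, pvInsPairs_tok, ih]

theorem pvParseGroup_snoc (g : List String) (line : String) :
    pvParseGroup (g ++ [line]) = pvParseLine (pvParseGroup g) line := by
  show pvInsPairs PySem.Dict.empty (pvGroupPairs (g ++ [line])) = _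
  rw [pvGroupPairs_eq, List.flatMap_append, pvInsPairs_append, ← pvGroupPairs_eq]
  simp only [List.flatMap_cons, List.flatMap_nil, List.append_nil]
  rw [pvInsPairs_line]
  rfl

theorem pvModify_last {α : Type} (xs : List α) (x : α) (f : α → α) :
    (xs ++ [x]).modify xs.length f = xs ++ [f x] := by
  induction xs with
  | nil => simp [List.modify]
  | cons a l ih => simpa [List.modify] using ih

theorem pvParseGroup_nil : pvParseGroup [] = PySem.Dict.empty := rfl

theorem pvMain (lines : List String) (gs : List (List String)) (cur : List String) :
    (lines.foldl (fun (st : List (PySem.Dict String String) × Nat) line =>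
        if ¬ (line = "") then (st.1.modify st.2 (fun d => pvParseLine d line), st.2)
        else (st.1 ++ [PySem.Dict.empty], st.2 + 1))
      (gs.map pvParseGroup ++ [pvParseGroup cur], gs.length)).1 =
    (let st := lines.foldl (fun (st : List (List String) × List String) line =>
        if line = "" then (st.1 ++ [st.2], ([] : List String)) else (st.1, st.2 ++ [line])) (gs, cur)
     (st.1 ++ [st.2]).map pvParseGroup) := by
  induction lines generalizing gs cur with
  | nil => simp
  | cons line rest ih =>
      by_cases h : line = ""
      · subst h
        simp only [List.foldl_cons, reduceIte]
        simpa [pvParseGroup_nil, List.map_append] using ih (gs ++ [cur]) []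
      · simp only [List.foldl_cons, if_neg h, if_pos (by simpa using h)]
        have hm : (gs.map pvParseGroup ++ [pvParseGroup cur]).modify gs.length
            (fun d => pvParseLine d line) = gs.map pvParseGroup ++ [pvParseGroup (cur ++ [line])] := by
          have := pvModify_last (gs.map pvParseGroup) (pvParseGroup cur) (fun d => pvParseLine d line)
          simpa [pvParseGroup_snoc] using this
        rw [hm]
        exact ih gs (cur ++ [line])

theorem pvPorts_eq (passports : List String) :
    get_formatted_passports passports = get_formatted_passports_alt passports := by
  unfold get_formatted_passports get_formatted_passports_alt
  have := pvMain passports [] []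
  simp only [List.map_nil, List.nil_append, List.length_nil, pvParseGroup_nil] at this
  simp only [this]

-- ===== VERDICT (by name: the statement is the Claim_ definition above) =====
theorem get_formatted_passports_spec : Claim_equal_get_formatted_passports := by
  intro passports _ _
  unfold Spec_get_formatted_passports
  exact pvPorts_eq passports
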